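-- pv_equiv track=rewrite | github.com/TWaltze/CS235 | hw5/hw5.py | sort
-- ===== SOURCE A (Python) =====
-- def permute(p, l):
-- 	new = []
--
-- 	for x in p:
-- 		new.append(l[x]);
--
-- 	return new
--
-- def C(k, m):
-- 	return [(x + k) % m for x in range(0, m)]
--
-- def M(a, m):
-- 	return [(x * a) % m for x in range(0, m)]
--
-- def isSorted(l):
-- 	check = list(l)
-- 	check.sort()
--
-- 	return l == check
--
-- def sort(l):
-- 	length = len(l)
--
-- 	if isSorted(l):
-- 		return [x for x in range(0, length)]
--
-- 	for x in range(1, length):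
-- 		# Test each cyclic permutation to see
-- 		# if it ever sorts
-- 		p = C(x, length)
-- 		cyclic = permute(p, l)
--
-- 		if isSorted(cyclic): return p
--
-- 		# Test each multiplication permutation
-- 		p = M(x, length)
-- 		mult = permute(p, l)
--
-- 		if isSorted(mult): return p
--
-- 	return None
-- ===== SOURCE B (Python) =====
-- def sort(l):
--     n = len(l)
--
--     # Positions of cyclic descents: l[i] > l[(i+1)%n].
--     desc = [i for i in range(n) if l[i] > l[(i + 1) % n]]
--
--     # No internal descent (desc empty means constant/empty; [n-1] means the
--     # only descent is at the wrap) <=> l already sorted: identity permutation.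
--     if desc == [] or desc == [n - 1]:
--         return list(range(n))
--
--     # A rotation by x sorts l iff the ONLY cyclic descent sits at position
--     # x-1 (the wrap of the rotated list); so the unique sorting rotation, if
--     # any, is read off the descent list in O(n): xc = desc[0]+1 when there is
--     # exactly one descent, otherwise no rotation works (encoded as xc = n).
--     xc = desc[0] + 1 if len(desc) == 1 else n
--
--     # Multiplicative candidates only need to be tried below xc (at x = xc the
--     # cyclic permutation wins first); each tested by an O(n) adjacent scan.
--     for a in range(1, xc):
--         if all(l[(i * a) % n] <= l[((i + 1) * a) % n] for i in range(n - 1)):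
--             return [(i * a) % n for i in range(n)]
--
--     if xc < n:
--         return [(i + xc) % n for i in range(n)]
--
--     return None
-- ===== Notes on version B (the rewrite author's own statement) =====
-- stated objective: faster
-- what changed: B never enumerates rotations: one O(n) cyclic-descent pass determines the unique sorting rotation (if any) in closed form, and only multiplicative candidates below that rotation index are tried, each by an O(n) adjacent scan instead of A's permute-copy-and-sort test.
import Mathlib
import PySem

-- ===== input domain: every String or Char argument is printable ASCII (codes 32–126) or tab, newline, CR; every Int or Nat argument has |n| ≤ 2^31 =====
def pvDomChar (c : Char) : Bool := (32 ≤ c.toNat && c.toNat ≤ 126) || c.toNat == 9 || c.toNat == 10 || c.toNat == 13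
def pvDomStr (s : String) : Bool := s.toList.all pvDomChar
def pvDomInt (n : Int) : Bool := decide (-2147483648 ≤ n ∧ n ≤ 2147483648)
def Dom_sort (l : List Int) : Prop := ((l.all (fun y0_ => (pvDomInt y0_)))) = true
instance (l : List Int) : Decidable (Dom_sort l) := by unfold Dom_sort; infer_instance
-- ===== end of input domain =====

-- B drops A's rotation search entirely: one cyclic-descent pass yields the unique sorting
-- rotation in closed form, and multiplicative candidates are checked by adjacent scans: faster.

-- ===== PORT A =====
-- l[x]: every index fed to permute comes from C/M, hence lies in [0, len l); the default 0 is never used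
def permute (p : List Int) (l : List Int) : List Int :=
  p.foldl (fun new x => new ++ [PySem.List.pyGetD l x 0]) []

def C (k m : Int) : List Int :=
  (PySem.List.pyRange 0 m 1).map (fun x => PySem.Int.mod (x + k) m)

def M (a m : Int) : List Int :=
  (PySem.List.pyRange 0 m 1).map (fun x => PySem.Int.mod (x * a) m)

def isSorted (l : List Int) : Bool :=
  l == PySem.List.sorted l (fun x => x) false

def sortLoop (l : List Int) (length : Int) : List Int → Option (List Int)
  | [] => none
  | x :: xs =>
    let p := C x length
    if isSorted (permute p l) then some p
    else
      let p2 := M x length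
      if isSorted (permute p2 l) then some p2
      else sortLoop l length xs

def sort (l : List Int) : Option (List Int) :=
  let length : Int := l.length
  if isSorted l then some (PySem.List.pyRange 0 length 1)
  else sortLoop l length (PySem.List.pyRange 1 length 1)

-- ===== PORT B =====
-- desc = [i for i in range(n) if l[i] > l[(i+1)%n]]  (indices produced stay in range)
def descList (l : List Int) (n : Int) : List Int :=
  (PySem.List.pyRange 0 n 1).filter
    (fun i => decide (PySem.List.pyGetD l i 0 > PySem.List.pyGetD l (PySem.Int.mod (i + 1) n) 0))

-- all(l[(i*a)%n] <= l[((i+1)*a)%n] for i in range(n-1))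
def multOK (l : List Int) (n a : Int) : Bool :=
  (PySem.List.pyRange 0 (n - 1) 1).all
    (fun i => decide (PySem.List.pyGetD l (PySem.Int.mod (i * a) n) 0
                      ≤ PySem.List.pyGetD l (PySem.Int.mod ((i + 1) * a) n) 0))

def multLoop (l : List Int) (n : Int) : List Int → Option (List Int)
  | [] => none
  | a :: as =>
    if multOK l n a then
      some ((PySem.List.pyRange 0 n 1).map (fun i => PySem.Int.mod (i * a) n))
    else multLoop l n as

def sort_alt (l : List Int) : Option (List Int) :=
  let n : Int := l.length
  let desc := descList l n
  if desc = [] ∨ desc = [n - 1] then some (PySem.List.pyRange 0 n 1)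
  else
    let xc : Int := if desc.length = 1 then desc.headD 0 + 1 else n
    match multLoop l n (PySem.List.pyRange 1 xc 1) with
    | some p => some p
    | none =>
      if xc < n then some ((PySem.List.pyRange 0 n 1).map (fun i => PySem.Int.mod (i + xc) n))
      else none

-- ===== PRECONDITION & SPEC =====
def Spec_sort (l : List Int) (out : Option (List Int)) : Prop := out = sort_alt l
instance (l : List Int) (out : Option (List Int)) : Decidable (Spec_sort l out) := by unfold Spec_sort; infer_instance

-- ===== CLAIM (what is proved, stated in full; the proofs are below) =====
def Claim_equal_sort : Prop := ∀ (l : List Int), Dom_sort l → Spec_sort l (sort l)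

-- ===== LEMMAS AND PROOFS =====

theorem isSorted_iff_pairwise (xs : List Int) :
    isSorted xs = true ↔ xs.Pairwise (· ≤ ·) := by
  constructor
  · intro h
    have h' : xs = PySem.List.sorted xs (fun x => x) false := by
      simpa [isSorted] using h
    have := PySem.List.sorted_pairwise xs (fun x => x)
    rw [← h'] at this
    simpa using this
  · intro h
    have := PySem.List.sorted_eq_self_of_pairwise (key := fun x => x) (xs := xs) (by simpa using h)
    simp [isSorted, this]

theorem pairwise_map_range (f : Nat → Int) (n : Nat) :
    ((List.range n).map f).Pairwise (· ≤ ·) ↔ ∀ k, k + 1 < n → f k ≤ f (k + 1) := by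
  rw [List.pairwise_map]
  constructor
  · intro hP k hk
    have := List.pairwise_iff_getElem.mp hP k (k + 1)
      (by simpa using (by omega : k < n)) (by simpa using hk) (by omega)
    simpa using this
  · intro h
    rw [List.pairwise_iff_getElem]
    intro i j hi hj hij
    have hj' : j < n := by simpa using hj
    simp only [List.getElem_range]
    have key : ∀ d, i + d < n → f i ≤ f (i + d) := by
      intro d
      induction d with
      | zero => intro _; simp
      | succ d ih =>
        intro hd
        calc f i ≤ f (i + d) := ih (by omega)
          _ ≤ f (i + d + 1) := h (i + d) (by omega)
    have hd := key (j - i) (by omega)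
    have hji : i + (j - i) = j := by omega
    rwa [hji] at hd

theorem isSorted_map_pyRange (h : Int → Int) (m : Int) :
    isSorted ((PySem.List.pyRange 0 m 1).map h)
      = (PySem.List.pyRange 0 (m - 1) 1).all (fun i => decide (h i ≤ h (i + 1))) := by
  rw [Bool.eq_iff_iff, isSorted_iff_pairwise, List.all_eq_true]
  rw [PySem.List.pyRange_zero, List.map_map]
  simp only [Function.comp_def]
  rw [pairwise_map_range (fun k => h k) m.toNat]
  constructor
  · intro hA i hi
    rw [PySem.List.mem_pyRange_one] at hi
    have hk : i.toNat + 1 < m.toNat := by omega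
    have := hA i.toNat hk
    simp only [decide_eq_true_eq]
    have e1 : ((i.toNat : Int)) = i := by omega
    have e2 : ((i.toNat + 1 : Nat) : Int) = i + 1 := by omega
    rwa [e2, e1] at this
  · intro hB k hk
    have := hB (k : Int) (by rw [PySem.List.mem_pyRange_one]; omega)
    simp only [decide_eq_true_eq] at this
    have e2 : ((k + 1 : Nat) : Int) = (k : Int) + 1 := by omega
    rwa [e2]

theorem permute_eq_map (p l : List Int) :
    permute p l = p.map (fun x => PySem.List.pyGetD l x 0) := by
  simpa [permute] using
    PySem.List.foldl_append_singleton_eq_map (fun x => PySem.List.pyGetD l x 0) p []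

theorem mem_descList (l : List Int) (n i : Int) :
    i ∈ descList l n ↔
      0 ≤ i ∧ i < n ∧
        PySem.List.pyGetD l (PySem.Int.mod (i + 1) n) 0 < PySem.List.pyGetD l i 0 := by
  simp [descList, List.mem_filter, PySem.List.mem_pyRange_one, and_assoc]

theorem pairwise_descList (l : List Int) (n : Int) :
    (descList l n).Pairwise (· < ·) :=
  (PySem.List.pairwise_lt_pyRange_one 0 n).filter _

theorem pmod_eq_self {n a : Int} (h1 : 0 ≤ a) (h2 : a < n) : PySem.Int.mod a n = a := by
  rw [PySem.Int.mod_eq_emod_of_pos (by omega)]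
  exact Int.emod_eq_of_lt h1 h2

theorem pmod_add_n {n : Int} (hn : 0 < n) (a : Int) :
    PySem.Int.mod (a + n) n = PySem.Int.mod a n := by
  rw [PySem.Int.mod_eq_emod_of_pos hn, PySem.Int.mod_eq_emod_of_pos hn, Int.add_emod_right]

theorem pmod_sub_n {n : Int} (hn : 0 < n) (a : Int) :
    PySem.Int.mod (a - n) n = PySem.Int.mod a n := by
  rw [PySem.Int.mod_eq_emod_of_pos hn, PySem.Int.mod_eq_emod_of_pos hn, Int.sub_emod_right]

-- cyclic characterization: rotating by x sorts l iff every cyclic descent sits at position x-1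
theorem cyclic_char (l : List Int) (n x : Int) (hx1 : 1 ≤ x) (hx2 : x ≤ n - 1) :
    isSorted (permute (C x n) l) = true ↔ ∀ i ∈ descList l n, i = x - 1 := by
  have hn : 0 < n := by omega
  rw [permute_eq_map, C, List.map_map]
  simp only [Function.comp_def]
  rw [isSorted_map_pyRange (fun i => PySem.List.pyGetD l (PySem.Int.mod (i + x) n) 0) n]
  rw [List.all_eq_true]
  constructor
  · intro hall j hj
    rw [mem_descList] at hj
    obtain ⟨hj0, hjn, hlt⟩ := hj
    by_contra hne
    by_cases hc : x ≤ j
    · have hm := hall (j - x) (by rw [PySem.List.mem_pyRange_one]; omega)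
      simp only [decide_eq_true_eq] at hm
      rw [show j - x + x = j by ring, show j - x + 1 + x = j + 1 by ring,
          pmod_eq_self hj0 hjn] at hm
      omega
    · have hm := hall (j + n - x) (by rw [PySem.List.mem_pyRange_one]; omega)
      simp only [decide_eq_true_eq] at hm
      rw [show j + n - x + x = j + n by ring, show j + n - x + 1 + x = (j + 1) + n by ring,
          pmod_add_n hn, pmod_add_n hn, pmod_eq_self hj0 hjn] at hm
      omega
  · intro hdesc i hi
    rw [PySem.List.mem_pyRange_one] at hi
    simp only [decide_eq_true_eq]
    have hP : ∀ j, 0 ≤ j → j < n → j ≠ x - 1 →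
        PySem.List.pyGetD l j 0 ≤ PySem.List.pyGetD l (PySem.Int.mod (j + 1) n) 0 := by
      intro j h0 h1 hne
      by_contra hlt
      exact hne (hdesc j ((mem_descList l n j).mpr ⟨h0, h1, by omega⟩))
    by_cases hc : i + x < n
    · rw [pmod_eq_self (by omega) hc]
      have := hP (i + x) (by omega) hc (by omega)
      rwa [show i + x + 1 = i + 1 + x by ring] at this
    · rw [show i + x = (i + x - n) + n by ring, pmod_add_n hn,
          pmod_eq_self (by omega) (by omega)]
      have := hP (i + x - n) (by omega) (by omega) (by omega)
      rwa [show i + x - n + 1 = (i + 1 + x) - n by ring, pmod_sub_n hn] at this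

theorem sorted_char (l : List Int) :
    isSorted l = true ↔ ∀ i ∈ descList l (l.length : Int), i = (l.length : Int) - 1 := by
  conv_lhs => rw [← PySem.List.map_pyGetD_pyRange_zero' l 0]
  rw [isSorted_map_pyRange, List.all_eq_true]
  constructor
  · intro hall j hj
    rw [mem_descList] at hj
    obtain ⟨h0, h1, hlt⟩ := hj
    by_contra hne
    have hm := hall j (by rw [PySem.List.mem_pyRange_one]; omega)
    simp only [decide_eq_true_eq] at hm
    rw [pmod_eq_self (by omega) (by omega)] at hlt
    omega
  · intro hdesc i hi
    rw [PySem.List.mem_pyRange_one] at hi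
    simp only [decide_eq_true_eq]
    by_contra hlt
    have hmem : i ∈ descList l (l.length : Int) :=
      (mem_descList _ _ _).mpr ⟨hi.1, by omega, by rw [pmod_eq_self (by omega) (by omega)]; omega⟩
    have := hdesc i hmem
    omega

theorem multOK_eq (l : List Int) (n a : Int) :
    isSorted (permute (M a n) l) = multOK l n a := by
  rw [permute_eq_map, M, List.map_map]
  simp only [Function.comp_def]
  exact isSorted_map_pyRange (fun i => PySem.List.pyGetD l (PySem.Int.mod (i * a) n) 0) n

theorem pairwise_all_eq {c : Int} {xs : List Int}
    (hp : xs.Pairwise (· < ·)) (h : ∀ i ∈ xs, i = c) : xs = [] ∨ xs = [c] := by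
  match xs with
  | [] => exact Or.inl rfl
  | [a] => exact Or.inr (by rw [h a (by simp)])
  | a :: b :: t =>
    exfalso
    have hab : a < b := (List.pairwise_cons.mp hp).1 b (by simp)
    have := h a (by simp)
    have := h b (by simp)
    omega

theorem loopA_skip (l : List Int) (n : Int) (xs ys : List Int)
    (h : ∀ x ∈ xs, isSorted (permute (C x n) l) = false) :
    sortLoop l n (xs ++ ys) =
      (match multLoop l n xs with | some p => some p | none => sortLoop l n ys) := by
  induction xs with
  | nil => simp [multLoop]
  | cons x xs ih =>
    simp only [List.cons_append, sortLoop, multLoop]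
    rw [h x (by simp), multOK_eq]
    by_cases hm : multOK l n x = true
    · simp [hm, M]
    · simp only [Bool.not_eq_true] at hm
      simp only [hm, Bool.false_eq_true, if_false]
      exact ih (fun y hy => h y (by simp [hy]))

theorem sortA_eq_alt (l : List Int) : sort l = sort_alt l := by
  simp only [sort, sort_alt]
  set n : Int := (l.length : Int) with hn
  by_cases hs : isSorted l = true
  · have hshape := pairwise_all_eq (pairwise_descList l n) ((sorted_char l).mp hs)
    rw [if_pos hs, if_pos hshape]
  · have hns : isSorted l = false := by simpa using hs
    have hcond : ¬(descList l n = [] ∨ descList l n = [n - 1]) := by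
      intro hc
      apply hs
      rw [sorted_char]
      intro i hi
      rcases hc with h | h
      · rw [h] at hi; cases hi
      · rw [h] at hi; simpa using hi
    have hex : ∃ d ∈ descList l n, d ≠ n - 1 := by
      by_contra hno
      refine hs ((sorted_char l).mpr ?_)
      intro d hd
      by_contra hne
      exact hno ⟨d, hd, hne⟩
    obtain ⟨d0, hd0mem, hd0ne⟩ := hex
    have hd0 := (mem_descList l n d0).mp hd0mem
    have hn2 : 2 ≤ n := by omega
    rw [if_neg hs, if_neg hcond]
    by_cases hlen : (descList l n).length = 1
    · -- unique descent: desc = [d0], the sorting rotation is d0+1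
      have hlist : descList l n = [d0] := by
        cases hdl : descList l n with
        | nil => rw [hdl] at hd0mem; cases hd0mem
        | cons a t =>
          rw [hdl] at hlen
          have ht : t = [] := by simpa using hlen
          rw [hdl, ht] at hd0mem
          simp only [List.mem_singleton] at hd0mem
          rw [ht, hd0mem]
    -- the rest of this branch continues below
      have hxc : (if (descList l n).length = 1 then (descList l n).headD 0 + 1 else n)
          = d0 + 1 := by rw [hlist]; simp
      rw [hxc]
      have hCfail : ∀ x ∈ PySem.List.pyRange 1 (d0 + 1) 1,
          isSorted (permute (C x n) l) = false := by
        intro x hx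
        rw [PySem.List.mem_pyRange_one] at hx
        have hne : ¬ (isSorted (permute (C x n) l) = true) := by
          rw [cyclic_char l n x (by omega) (by omega)]
          intro hall
          have := hall d0 (hlist ▸ hd0mem)
          omega
        simpa using hne
      rw [PySem.List.pyRange_one_append 1 (d0 + 1) n (by omega) (by omega),
          loopA_skip l n _ _ hCfail]
      cases hm : multLoop l n (PySem.List.pyRange 1 (d0 + 1) 1) with
      | some p => rfl
      | none =>
        rw [PySem.List.pyRange_one_cons (by omega : d0 + 1 < n)]
        simp only [sortLoop]
        have hCok : isSorted (permute (C (d0 + 1) n) l) = true := by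
          rw [cyclic_char l n (d0 + 1) (by omega) (by omega)]
          intro i hi
          rw [hlist] at hi
          simp only [List.mem_singleton] at hi
          omega
        rw [hCok, if_pos rfl, if_pos (by omega : d0 + 1 < n)]
        rfl
    · -- at least two descents: no rotation sorts, xc = n
      have hd1 : ∃ a b t, descList l n = a :: b :: t := by
        cases hdl : descList l n with
        | nil => rw [hdl] at hd0mem; cases hd0mem
        | cons a t =>
          cases t with
          | nil => exact absurd (by rw [hdl]; rfl) hlen
          | cons b t' => exact ⟨a, b, t', rfl⟩
      obtain ⟨a, b, t, hdl⟩ := hd1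
      have hab : a < b := by
        have := pairwise_descList l n
        rw [hdl] at this
        exact (List.pairwise_cons.mp this).1 b (by simp)
      have hCfail : ∀ x ∈ PySem.List.pyRange 1 n 1,
          isSorted (permute (C x n) l) = false := by
        intro x hx
        rw [PySem.List.mem_pyRange_one] at hx
        have hne : ¬ (isSorted (permute (C x n) l) = true) := by
          rw [cyclic_char l n x (by omega) (by omega)]
          intro hall
          have ha := hall a (by rw [hdl]; simp)
          have hb := hall b (by rw [hdl]; simp)
          omega
        simpa using hne
      rw [if_neg hlen]
      have hA : sortLoop l n (PySem.List.pyRange 1 n 1) =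
          (match multLoop l n (PySem.List.pyRange 1 n 1) with
           | some p => some p
           | none => sortLoop l n []) := by
        conv_lhs => rw [show PySem.List.pyRange 1 n 1 = PySem.List.pyRange 1 n 1 ++ []
          from (List.append_nil _).symm]
        rw [loopA_skip l n _ _ hCfail]
      rw [hA]
      cases hm : multLoop l n (PySem.List.pyRange 1 n 1) with
      | some p => rfl
      | none => simp [sortLoop]

-- ===== VERDICT (by name: the statement is the Claim_ definition above) =====
theorem sort_spec : Claim_equal_sort := by
  intro l _
  show sort l = sort_alt l
  exact sortA_eq_alt l
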